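-- pv_equiv track=rewrite | github.com/user7217/OxygenTracker | standalone_importer.py | _check_customer_duplicate
-- ===== SOURCE A (Python) =====
-- from typing import List, Dict, Optional, Any
--
-- def _check_customer_duplicate(customer_data: Dict, existing_customers: List[Dict]) -> bool:
--     """Check if customer already exists"""
--     customer_no = customer_data.get('customer_no', '')
--     customer_name = customer_data.get('customer_name', '')
--     customer_phone = customer_data.get('customer_phone', '')
--
--     for existing in existing_customers:
--         if (customer_no and existing.get('customer_no') == customer_no) or \
--            (customer_name and existing.get('customer_name') == customer_name) or \
--            (customer_phone and existing.get('customer_phone') == customer_phone):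
--             return True
--
--     return False
-- ===== SOURCE B (Python) =====
-- def _check_customer_duplicate(customer_data, existing_customers):
--     """Field-major variant: instead of scanning customers once and testing three
--     fields per row, iterate over the three fields; for each truthy query value,
--     make one dedicated pass over the existing customers for just that field."""
--     for field in ('customer_no', 'customer_name', 'customer_phone'):
--         value = customer_data.get(field, '')
--         if value and any(existing.get(field) == value for existing in existing_customers):
--             return True
--     return False
-- ===== Notes on version B (the rewrite author's own statement) =====
-- stated objective: alternative
-- what changed: B transposes the loops: instead of A's single customer-major scan testing three fields per row with early return, B iterates field-by-field and makes one dedicated pass over the existing customers per truthy field value (staged passes instead of one combined pass).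
import Mathlib
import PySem

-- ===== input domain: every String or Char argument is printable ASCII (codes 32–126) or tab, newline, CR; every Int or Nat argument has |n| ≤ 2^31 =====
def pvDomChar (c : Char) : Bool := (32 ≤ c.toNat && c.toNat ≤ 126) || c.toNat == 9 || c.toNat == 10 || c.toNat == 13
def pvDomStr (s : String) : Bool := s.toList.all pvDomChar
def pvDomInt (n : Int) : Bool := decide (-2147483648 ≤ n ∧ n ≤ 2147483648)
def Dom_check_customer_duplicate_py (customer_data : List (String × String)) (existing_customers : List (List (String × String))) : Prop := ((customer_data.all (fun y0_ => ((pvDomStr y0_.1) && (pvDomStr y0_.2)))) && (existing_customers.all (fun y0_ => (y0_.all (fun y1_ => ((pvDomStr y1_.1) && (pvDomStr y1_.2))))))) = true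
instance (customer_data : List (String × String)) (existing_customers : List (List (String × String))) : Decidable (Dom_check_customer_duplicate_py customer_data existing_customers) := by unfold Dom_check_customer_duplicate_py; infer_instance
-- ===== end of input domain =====

-- B transposes the loops: field-by-field staged passes over the existing customers
-- instead of A's single customer-major scan testing three fields per row (alternative decomposition).

-- ===== PORT A =====
-- existing.get(k) (no default): first-match association lookup, Option String
def pvGet (e : List (String × String)) (k : String) : Option String :=
  (PySem.Dict.mk e).get? k

-- the 'for existing in existing_customers: if …: return True' loop
def pvALoop (customer_no customer_name customer_phone : String) :
    List (List (String × String)) → Bool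
  | [] => false
  | existing :: rest =>
      if ((customer_no != "") && (pvGet existing "customer_no" == some customer_no)) ||
         ((customer_name != "") && (pvGet existing "customer_name" == some customer_name)) ||
         ((customer_phone != "") && (pvGet existing "customer_phone" == some customer_phone)) then
        true
      else
        pvALoop customer_no customer_name customer_phone rest

def check_customer_duplicate_py (customer_data : List (String × String)) (existing_customers : List (List (String × String))) : Bool :=
  let customer_no := (PySem.Dict.mk customer_data).getD "customer_no" ""
  let customer_name := (PySem.Dict.mk customer_data).getD "customer_name" ""
  let customer_phone := (PySem.Dict.mk customer_data).getD "customer_phone" ""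
  pvALoop customer_no customer_name customer_phone existing_customers

-- ===== PORT B =====
-- one field: fetch the query value, and if truthy scan the rows for that field only
def pvFieldDup (customer_data : List (String × String)) (existing_customers : List (List (String × String))) (field : String) : Bool :=
  let value := (PySem.Dict.mk customer_data).getD field ""
  (value != "") && existing_customers.any (fun existing => pvGet existing field == some value)

-- the 'for field in (…): if …: return True' loop over the three field names
def check_customer_duplicate_py_alt (customer_data : List (String × String)) (existing_customers : List (List (String × String))) : Bool :=
  ["customer_no", "customer_name", "customer_phone"].any
    (fun field => pvFieldDup customer_data existing_customers field)

-- ===== PRECONDITION & SPEC =====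
def Spec_check_customer_duplicate_py (customer_data : List (String × String)) (existing_customers : List (List (String × String))) (out : Bool) : Prop := out = check_customer_duplicate_py_alt customer_data existing_customers
instance (customer_data : List (String × String)) (existing_customers : List (List (String × String))) (out : Bool) : Decidable (Spec_check_customer_duplicate_py customer_data existing_customers out) := by unfold Spec_check_customer_duplicate_py; infer_instance

-- ===== CLAIM (what is proved, stated in full; the proofs are below) =====
def Claim_equal_check_customer_duplicate_py : Prop := ∀ (customer_data : List (String × String)) (existing_customers : List (List (String × String))), Dom_check_customer_duplicate_py customer_data existing_customers → Spec_check_customer_duplicate_py customer_data existing_customers (check_customer_duplicate_py customer_data existing_customers)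

-- ===== LEMMAS AND PROOFS =====

-- A's early-return loop is List.any of the row condition
theorem pvALoop_eq_any (no name phone : String) (ex : List (List (String × String))) :
    pvALoop no name phone ex =
      ex.any (fun e =>
        ((no != "") && (pvGet e "customer_no" == some no)) ||
        ((name != "") && (pvGet e "customer_name" == some name)) ||
        ((phone != "") && (pvGet e "customer_phone" == some phone))) := by
  induction ex with
  | nil => rfl
  | cons e rest ih =>
      simp only [pvALoop, List.any_cons]
      split <;> simp_all

-- the customer-major any of three guarded tests equals the field-major disjunction
theorem any_tri_guard (g1 g2 g3 : Bool) (p1 p2 p3 : List (String × String) → Bool)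
    (ex : List (List (String × String))) :
    ex.any (fun e => (g1 && p1 e) || ((g2 && p2 e) || (g3 && p3 e))) =
      ((g1 && ex.any p1) || ((g2 && ex.any p2) || (g3 && ex.any p3))) := by
  induction ex with
  | nil => simp
  | cons e rest ih =>
      simp only [List.any_cons, ih]
      cases g1 <;> cases g2 <;> cases g3 <;>
        cases p1 e <;> cases p2 e <;> cases p3 e <;> simp

-- ===== VERDICT (by name: the statement is the Claim_ definition above) =====
theorem check_customer_duplicate_py_spec : Claim_equal_check_customer_duplicate_py := by
  intro customer_data existing_customers _
  unfold Spec_check_customer_duplicate_py check_customer_duplicate_py check_customer_duplicate_py_alt pvFieldDup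
  simp only [pvALoop_eq_any, Bool.or_assoc, any_tri_guard, List.any_cons, List.any_nil, Bool.or_false]
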